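-- pv_equiv track=rewrite | github.com/pokerdio/generic | cf/cf474f.py | make_segtree
-- ===== SOURCE A (Python) =====
-- from math import gcd
--
-- def make_segtree(s, st=None, idx=None, l=None, r=None):
--     """segment tree tracking gcd, min value, min value count of segments"""
--     if st == None:
--         l = 0
--         r = len(s)
--         st = [None] * (4 * r)
--         idx = 0
--
--     if l + 1 == r:
--         st[idx] = (s[l], s[l], 1)
--         return st
--     mid = (l + r) // 2
--     idx_l = 2 * idx + 1
--     idx_r = idx_l + 1
--     make_segtree(s, st, idx_l, l, mid)
--     make_segtree(s, st, idx_r, mid, r)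
--     gcd1, min1, count1 = st[idx_l]
--     gcd2, min2, count2 = st[idx_r]
--     count12 = count1 + count2 if min1 == min2 else min(((min1, count1), (min2, count2)))[1]
--     st[idx] = (gcd(gcd1, gcd2), min(min1, min2), count12)
--     return st
-- ===== SOURCE B (Python) =====
-- from math import gcd
--
-- def make_segtree(s, st=None, idx=None, l=None, r=None):
--     """segment tree tracking gcd, min value, min value count of segments
--     (iterative: explicit post-order stack instead of recursion)"""
--     if st == None:
--         l = 0
--         r = len(s)
--         st = [None] * (4 * r)
--         idx = 0
--     stack = [(idx, l, r, False)]
--     while stack: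
--         i, a, b, ready = stack.pop()
--         if a + 1 == b:
--             st[i] = (s[a], s[a], 1)
--         elif ready:
--             g1, m1, c1 = st[2 * i + 1]
--             g2, m2, c2 = st[2 * i + 2]
--             if m1 < m2:
--                 m, c = m1, c1
--             elif m2 < m1:
--                 m, c = m2, c2
--             else:
--                 m, c = m1, c1 + c2
--             st[i] = (gcd(g1, g2), m, c)
--         else:
--             if b <= a:
--                 raise ValueError("empty segment")
--             mid = (a + b) // 2
--             stack.append((i, a, b, True))
--             stack.append((2 * i + 2, mid, b, False))
--             stack.append((2 * i + 1, a, mid, False))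
--     return st
-- ===== Notes on version B (the rewrite author's own statement) =====
-- stated objective: alternative
-- what changed: The recursive tree build is replaced by an explicit-stack post-order traversal: fresh frames expand into left/right/ready frames, ready frames merge the two child slots with the same gcd/min/min-count tie rule; the array layout and child indexing are unchanged.
import Mathlib
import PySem

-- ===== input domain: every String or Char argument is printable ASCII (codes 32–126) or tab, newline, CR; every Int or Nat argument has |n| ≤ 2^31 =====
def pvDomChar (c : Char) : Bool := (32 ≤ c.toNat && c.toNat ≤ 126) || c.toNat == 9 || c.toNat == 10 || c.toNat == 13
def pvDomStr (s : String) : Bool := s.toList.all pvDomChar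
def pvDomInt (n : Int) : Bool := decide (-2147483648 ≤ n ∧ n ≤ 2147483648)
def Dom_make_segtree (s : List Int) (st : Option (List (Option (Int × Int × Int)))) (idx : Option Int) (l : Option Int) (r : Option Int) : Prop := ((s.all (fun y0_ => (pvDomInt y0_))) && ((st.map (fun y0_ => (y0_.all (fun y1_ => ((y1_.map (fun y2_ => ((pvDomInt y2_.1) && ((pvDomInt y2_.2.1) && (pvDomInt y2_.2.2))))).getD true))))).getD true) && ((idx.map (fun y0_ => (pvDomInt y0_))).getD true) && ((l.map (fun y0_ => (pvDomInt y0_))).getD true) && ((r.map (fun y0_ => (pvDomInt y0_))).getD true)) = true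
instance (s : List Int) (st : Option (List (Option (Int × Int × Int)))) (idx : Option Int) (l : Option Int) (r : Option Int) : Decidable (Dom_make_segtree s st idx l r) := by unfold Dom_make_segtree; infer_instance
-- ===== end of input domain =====

-- B replaces A's recursion by an explicit-stack post-order traversal (same array layout,
-- same child indexing, same merge/tie rule); equivalence is about the RETURN value (both
-- Pythons also mutate a caller-supplied st in the same way).

-- ===== PORT A =====
-- Python's  st[i] = v  and unpacking read of st[i] (negative index = from the end; exact
-- inside Pre_, where every access is in range; out-of-range Python raises, outside Pre_)
def pvWriteA (st : List (Option (Int × Int × Int))) (i : Int) (v : Int × Int × Int) :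
    List (Option (Int × Int × Int)) :=
  if 0 ≤ i then st.set i.toNat (some v) else st.set (st.length + i).toNat (some v)

def pvReadA (st : List (Option (Int × Int × Int))) (i : Int) : Int × Int × Int :=
  (PySem.List.pyGetD st i none).getD (0, 0, 0)

-- A's recursion, fuel-guarded (fuel only makes it total; inside Pre_ depth < fuel always)
def segA (s : List Int) : Nat → List (Option (Int × Int × Int)) → Int → Int → Int →
    List (Option (Int × Int × Int))
  | 0, st, _, _, _ => st
  | fuel + 1, st, idx, l, r =>
    if l + 1 = r then
      pvWriteA st idx (PySem.List.pyGetD s l 0, PySem.List.pyGetD s l 0, 1)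
    else
      let mid := PySem.Int.floordiv (l + r) 2
      let idxl := 2 * idx + 1
      let idxr := idxl + 1
      let st1 := segA s fuel st idxl l mid
      let st2 := segA s fuel st1 idxr mid r
      let t1 := pvReadA st2 idxl
      let t2 := pvReadA st2 idxr
      -- Python: count1+count2 if min1 == min2 else min(((min1,count1),(min2,count2)))[1]
      -- (the else-branch 'min' is the lexicographic minimum of the two pairs)
      let c12 := if t1.2.1 = t2.2.1 then t1.2.2 + t2.2.2
        else if t1.2.1 < t2.2.1 ∨ (t1.2.1 = t2.2.1 ∧ t1.2.2 ≤ t2.2.2) then t1.2.2 else t2.2.2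
      pvWriteA st2 idx ((Int.gcd t1.1 t2.1 : Int), min t1.2.1 t2.2.1, c12)

def make_segtree (s : List Int) (st : Option (List (Option (Int × Int × Int)))) (idx : Option Int) (l : Option Int) (r : Option Int) : List (Option (Int × Int × Int)) :=
  match st with
  | none => segA s (s.length + 1) (List.replicate (4 * s.length) none) 0 0 (s.length : Int)
  | some st0 =>
    match idx, l, r with
    | some i, some l0, some r0 => segA s ((r0 - l0).toNat + 1) st0 i l0 r0
    | _, _, _ => []   -- Python raises TypeError (arithmetic on None); outside Pre_

-- ===== PORT B =====
-- B's own copies of the st[i] = v / st[i] primitives (same Python construct)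
def pvWriteB (st : List (Option (Int × Int × Int))) (i : Int) (v : Int × Int × Int) :
    List (Option (Int × Int × Int)) :=
  if 0 ≤ i then st.set i.toNat (some v) else st.set (st.length + i).toNat (some v)

def pvReadB (st : List (Option (Int × Int × Int))) (i : Int) : Int × Int × Int :=
  (PySem.List.pyGetD st i none).getD (0, 0, 0)

-- B's while-loop over the explicit stack (head = top of stack), fuel-guarded for totality
def loopB (s : List Int) : Nat → List (Int × Int × Int × Bool) → List (Option (Int × Int × Int)) →
    List (Option (Int × Int × Int))
  | _, [], st => st
  | 0, _ :: _, st => st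
  | fuel + 1, (i, a, b, ready) :: rest, st =>
    if a + 1 = b then
      loopB s fuel rest (pvWriteB st i (PySem.List.pyGetD s a 0, PySem.List.pyGetD s a 0, 1))
    else if ready then
      let t1 := pvReadB st (2 * i + 1)
      let t2 := pvReadB st (2 * i + 2)
      let mc := if t1.2.1 < t2.2.1 then (t1.2.1, t1.2.2)
        else if t2.2.1 < t1.2.1 then (t2.2.1, t2.2.2)
        else (t1.2.1, t1.2.2 + t2.2.2)
      loopB s fuel rest (pvWriteB st i ((Int.gcd t1.1 t2.1 : Int), mc.1, mc.2))
    else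
      if b ≤ a then st   -- B raises ValueError("empty segment"); outside Pre_
      else
        let mid := PySem.Int.floordiv (a + b) 2
        loopB s fuel ((2 * i + 1, a, mid, false) :: (2 * i + 2, mid, b, false) :: (i, a, b, true) :: rest) st

def make_segtree_alt (s : List Int) (st : Option (List (Option (Int × Int × Int)))) (idx : Option Int) (l : Option Int) (r : Option Int) : List (Option (Int × Int × Int)) :=
  if st.isSome then
    if idx.isSome && l.isSome && r.isSome then
      loopB s (3 * (r.getD 0 - l.getD 0).toNat + 1) [(idx.getD 0, l.getD 0, r.getD 0, false)] (st.getD [])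
    else []   -- Python raises TypeError; outside Pre_
  else loopB s (3 * s.length + 1) [(0, 0, (s.length : Int), false)] (List.replicate (4 * s.length) none)

-- ===== PRECONDITION & SPEC =====
-- Pre_ admits the top-level call (st=None, s nonempty; on s=[] A recurses forever) and the
-- explicit-st recursion-style calls that return: with nonnegative idx and 0 ≤ l < r ≤ len(s)
-- these are exactly the calls whose deepest rightmost node slot (i+2)*2^ceil(log2(r-l))-2
-- still fits in st; of the calls that return only via Python's negative-index wraparound it
-- keeps the leaf ones (l+1=r) and excludes internal ones, a defensible-corner artefact on
-- which B returns the identical value anyway.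
def Pre_make_segtree (s : List Int) (st : Option (List (Option (Int × Int × Int)))) (idx : Option Int) (l : Option Int) (r : Option Int) : Prop :=
  (st = none ∧ s ≠ []) ∨
  (st.isSome ∧ idx.isSome ∧ l.isSome ∧ r.isSome ∧
    0 ≤ idx.getD 0 ∧ 0 ≤ l.getD 0 ∧ l.getD 0 < r.getD 0 ∧ r.getD 0 ≤ (s.length : Int) ∧
    (idx.getD 0 + 2) * 2 ^ Nat.clog 2 (r.getD 0 - l.getD 0).toNat - 2 < ((st.getD []).length : Int)) ∨
  (st.isSome ∧ idx.isSome ∧ l.isSome ∧ r.isSome ∧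
    (l.getD 0) + 1 = r.getD 0 ∧ PySem.Raise.InRange s.length (l.getD 0) ∧
    PySem.Raise.InRange (st.getD []).length (idx.getD 0))
instance (s : List Int) (st : Option (List (Option (Int × Int × Int)))) (idx : Option Int) (l : Option Int) (r : Option Int) : Decidable (Pre_make_segtree s st idx l r) := by unfold Pre_make_segtree; infer_instance
def pvWitness_make_segtree : List Int × (Option (List (Option (Int × Int × Int)))) × Option Int × Option Int × Option Int := ([3, 6, 4], none, none, none, none)

def Spec_make_segtree (s : List Int) (st : Option (List (Option (Int × Int × Int)))) (idx : Option Int) (l : Option Int) (r : Option Int) (out : List (Option (Int × Int × Int))) : Prop := out = make_segtree_alt s st idx l r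
instance (s : List Int) (st : Option (List (Option (Int × Int × Int)))) (idx : Option Int) (l : Option Int) (r : Option Int) (out : List (Option (Int × Int × Int))) : Decidable (Spec_make_segtree s st idx l r out) := by unfold Spec_make_segtree; infer_instance

-- ===== CLAIM (what is proved, stated in full; the proofs are below) =====
def Claim_equal_make_segtree : Prop := ∀ (s : List Int) (st : Option (List (Option (Int × Int × Int)))) (idx : Option Int) (l : Option Int) (r : Option Int), Dom_make_segtree s st idx l r → Pre_make_segtree s st idx l r → Spec_make_segtree s st idx l r (make_segtree s st idx l r)

-- ===== LEMMAS AND PROOFS =====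

theorem pvWriteB_eq : pvWriteB = pvWriteA := rfl
theorem pvReadB_eq : pvReadB = pvReadA := rfl

-- fuel-insensitivity of A's recursion: any fuel ≥ the interval length computes the same tree
theorem segA_fuel (s : List Int) : ∀ k : Nat, ∀ (a b i : Int) (st : List (Option (Int × Int × Int))) (f1 f2 : Nat),
    a < b → (b - a).toNat = k → k ≤ f1 → k ≤ f2 →
    segA s f1 st i a b = segA s f2 st i a b := by
  intro k
  induction k using Nat.strong_induction_on with
  | _ k IH =>
    intro a b i st f1 f2 hab hk h1 h2
    have hk1 : 1 ≤ k := by omega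
    obtain ⟨f1', rfl⟩ : ∃ f1', f1 = f1' + 1 := ⟨f1 - 1, by omega⟩
    obtain ⟨f2', rfl⟩ : ∃ f2', f2 = f2' + 1 := ⟨f2 - 1, by omega⟩
    by_cases hleaf : a + 1 = b
    · simp [segA, hleaf]
    · have hk2 : 2 ≤ k := by omega
      simp only [segA, if_neg hleaf]
      have hmid : PySem.Int.floordiv (a + b) 2 = (a + b) / 2 :=
        PySem.Int.floordiv_eq_ediv_of_pos (by norm_num)
      generalize hgen : PySem.Int.floordiv (a + b) 2 = mid
      rw [hgen] at hmid
      have hb1 : a < mid := by omega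
      have hb2 : mid < b := by omega
      have hleft : segA s f1' st (2 * i + 1) a mid = segA s f2' st (2 * i + 1) a mid := by
        exact IH (mid - a).toNat (by omega) a mid _ st f1' f2' hb1 rfl (by omega) (by omega)
      rw [hleft]
      have hright : segA s f1' (segA s f2' st (2 * i + 1) a mid) (2 * i + 1 + 1) mid b
          = segA s f2' (segA s f2' st (2 * i + 1) a mid) (2 * i + 1 + 1) mid b := by
        exact IH (b - mid).toNat (by omega) mid b _ _ f1' f2' hb2 rfl (by omega) (by omega)
      rw [hright]

-- the merge value written by B's ready frame equals the one written by A
theorem merge_eq (t1 t2 : Int × Int × Int) :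
    ((Int.gcd t1.1 t2.1 : Int), (if t1.2.1 < t2.2.1 then (t1.2.1, t1.2.2)
        else if t2.2.1 < t1.2.1 then (t2.2.1, t2.2.2) else (t1.2.1, t1.2.2 + t2.2.2)).1,
      (if t1.2.1 < t2.2.1 then (t1.2.1, t1.2.2)
        else if t2.2.1 < t1.2.1 then (t2.2.1, t2.2.2) else (t1.2.1, t1.2.2 + t2.2.2)).2)
    = ((Int.gcd t1.1 t2.1 : Int), min t1.2.1 t2.2.1,
      if t1.2.1 = t2.2.1 then t1.2.2 + t2.2.2
        else if t1.2.1 < t2.2.1 ∨ (t1.2.1 = t2.2.1 ∧ t1.2.2 ≤ t2.2.2) then t1.2.2 else t2.2.2) := by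
  rcases lt_trichotomy t1.2.1 t2.2.1 with h | h | h
  · simp [min_eq_left (le_of_lt h), ne_of_lt h, h]
  · simp [h]
  · simp [min_eq_right (le_of_lt h), (ne_of_lt h).symm, not_lt_of_gt h, h]

-- main lemma: popping a fresh frame for [a,b) consumes exactly 3*(b-a)-2 iterations and
-- leaves the stack and state exactly as A's recursive call on that interval would
theorem loop_eq_seg (s : List Int) : ∀ k : Nat, ∀ (a b i : Int) (st : List (Option (Int × Int × Int))) (rest : List (Int × Int × Int × Bool)) (fuel : Nat),
    a < b → (b - a).toNat = k →
    loopB s (3 * k - 2 + fuel) ((i, a, b, false) :: rest) st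
      = loopB s fuel rest (segA s (k + 1) st i a b) := by
  intro k
  induction k using Nat.strong_induction_on with
  | _ k IH =>
    intro a b i st rest fuel hab hk
    have hk1 : 1 ≤ k := by omega
    by_cases hleaf : a + 1 = b
    · have hk' : k = 1 := by omega
      subst hk'
      have h1f : 3 * 1 - 2 + fuel = fuel + 1 := by omega
      rw [h1f]
      simp [loopB, segA, hleaf, pvWriteB_eq]
    · have hk2 : 2 ≤ k := by omega
      have hfe : 3 * k - 2 + fuel
          = (3 * (PySem.Int.floordiv (a + b) 2 - a).toNat - 2
            + ((3 * (b - PySem.Int.floordiv (a + b) 2).toNat - 2) + (1 + fuel))) + 1 := by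
        have hmid : PySem.Int.floordiv (a + b) 2 = (a + b) / 2 :=
          PySem.Int.floordiv_eq_ediv_of_pos (by norm_num)
        rw [hmid]; omega
      rw [hfe]
      simp only [loopB, if_neg hleaf, Bool.false_eq_true, if_false, if_neg (not_le.mpr hab)]
      -- unfold A one level on the right
      simp only [segA, if_neg hleaf]
      have hmid : PySem.Int.floordiv (a + b) 2 = (a + b) / 2 :=
        PySem.Int.floordiv_eq_ediv_of_pos (by norm_num)
      generalize hgen : PySem.Int.floordiv (a + b) 2 = mid
      rw [hgen] at hmid
      have hb1 : a < mid := by omega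
      have hb2 : mid < b := by omega
      have hsk : (mid - a).toNat + (b - mid).toNat = k := by omega
      rw [IH (mid - a).toNat (by omega) a mid (2 * i + 1) st _ _ hb1 rfl]
      rw [IH (b - mid).toNat (by omega) mid b (2 * i + 2) _ _ _ hb2 rfl]
      -- pop the ready frame
      rw [Nat.add_comm 1 fuel]
      simp only [loopB, if_neg hleaf, if_true]
      have hL : segA s k st (2 * i + 1) a mid = segA s ((mid - a).toNat + 1) st (2 * i + 1) a mid :=
        segA_fuel s (mid - a).toNat a mid _ st k _ hb1 rfl (by omega) (by omega)
      have hR : segA s k (segA s ((mid - a).toNat + 1) st (2 * i + 1) a mid) (2 * i + 1 + 1) mid b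
          = segA s ((b - mid).toNat + 1) (segA s ((mid - a).toNat + 1) st (2 * i + 1) a mid) (2 * i + 1 + 1) mid b :=
        segA_fuel s (b - mid).toNat mid b _ _ k _ hb2 rfl (by omega) (by omega)
      rw [hL, hR]
      have h21 : (2 : Int) * i + 2 = 2 * i + 1 + 1 := by ring
      rw [h21]
      simp only [pvWriteB_eq, pvReadB_eq]
      rw [merge_eq]

-- ===== VERDICT (by name: the statement is the Claim_ definition above) =====
theorem make_segtree_spec : Claim_equal_make_segtree := by
  intro s st idx l r _hdom hpre
  unfold Spec_make_segtree
  rcases hpre with ⟨hst, hs⟩ | ⟨hst, hidx, hl, hr, _hi, _hl0, hlt, _hr0, _hfit⟩ | ⟨hst, hidx, hl, hr, hleaf, _hls, _hli⟩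
  · subst hst
    have hn : 1 ≤ s.length := by
      cases s with
      | nil => exact absurd rfl hs
      | cons x xs => simp
    show make_segtree s none idx l r = make_segtree_alt s none idx l r
    simp only [make_segtree, make_segtree_alt]
    have hk : ((s.length : Int) - 0).toNat = s.length := by omega
    have hfe : 3 * s.length + 1 = 3 * s.length - 2 + 3 := by omega
    rw [hfe, loop_eq_seg s s.length 0 (s.length : Int) 0 _ [] 3 (by exact_mod_cast hn) hk]
    simp [loopB]
  · obtain ⟨st0, rfl⟩ := Option.isSome_iff_exists.mp hst
    obtain ⟨i, rfl⟩ := Option.isSome_iff_exists.mp hidx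
    obtain ⟨l0, rfl⟩ := Option.isSome_iff_exists.mp hl
    obtain ⟨r0, rfl⟩ := Option.isSome_iff_exists.mp hr
    simp only [Option.getD_some] at hlt
    simp only [make_segtree, make_segtree_alt, Option.isSome_some, Option.getD_some,
      Bool.and_self, if_true]
    have hfe : 3 * (r0 - l0).toNat + 1 = 3 * (r0 - l0).toNat - 2 + 3 := by omega
    rw [hfe, loop_eq_seg s (r0 - l0).toNat l0 r0 i st0 [] 3 hlt rfl]
    simp [loopB]
  · obtain ⟨st0, rfl⟩ := Option.isSome_iff_exists.mp hst
    obtain ⟨i, rfl⟩ := Option.isSome_iff_exists.mp hidx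
    obtain ⟨l0, rfl⟩ := Option.isSome_iff_exists.mp hl
    obtain ⟨r0, rfl⟩ := Option.isSome_iff_exists.mp hr
    simp only [Option.getD_some] at hleaf
    have hk : (r0 - l0).toNat = 1 := by omega
    simp [make_segtree, make_segtree_alt, hk, segA, loopB, hleaf, pvWriteB_eq]
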